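-- pv_equiv track=rewrite | github.com/Nauro-AI/nauro | packages/nauro/src/nauro/store/reader.py | _file_level_diff
-- ===== SOURCE A (Python) =====
-- def _file_level_diff(prev: dict, curr: dict) -> list[str]:
--     """Compute a simple file-level diff between two snapshots."""
--     prev_files = prev.get("files", {})
--     curr_files = curr.get("files", {})
--     all_keys = sorted(set(prev_files) | set(curr_files))
--
--     lines = []
--     for key in all_keys:
--         if key not in prev_files:
--             lines.append(f"+ Added: {key}")
--         elif key not in curr_files:
--             lines.append(f"- Removed: {key}")
--         elif prev_files[key] != curr_files[key]:
--             lines.append(f"~ Modified: {key}")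
--     return lines
-- ===== SOURCE B (Python) =====
-- def _file_level_diff(prev: dict, curr: dict) -> list[str]:
--     """Set-algebra diff: compute the three categories first, then one sort by key."""
--     prev_files = prev.get("files", {})
--     curr_files = curr.get("files", {})
--     pk, ck = set(prev_files), set(curr_files)
--     tagged = [(k, f"+ Added: {k}") for k in ck - pk]
--     tagged += [(k, f"- Removed: {k}") for k in pk - ck]
--     tagged += [(k, f"~ Modified: {k}") for k in pk & ck if prev_files[k] != curr_files[k]]
--     tagged.sort(key=lambda item: item[0])
--     return [line for _, line in tagged]
-- ===== Notes on version B (the rewrite author's own statement) =====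
-- stated objective: alternative
-- what changed: Instead of classifying each key while walking the sorted union once, B computes the three change categories up front with set algebra (ck-pk, pk-ck, pk&ck filtered by value inequality), tags each key with its formatted line, and performs a single sort by key at the end.
import Mathlib
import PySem

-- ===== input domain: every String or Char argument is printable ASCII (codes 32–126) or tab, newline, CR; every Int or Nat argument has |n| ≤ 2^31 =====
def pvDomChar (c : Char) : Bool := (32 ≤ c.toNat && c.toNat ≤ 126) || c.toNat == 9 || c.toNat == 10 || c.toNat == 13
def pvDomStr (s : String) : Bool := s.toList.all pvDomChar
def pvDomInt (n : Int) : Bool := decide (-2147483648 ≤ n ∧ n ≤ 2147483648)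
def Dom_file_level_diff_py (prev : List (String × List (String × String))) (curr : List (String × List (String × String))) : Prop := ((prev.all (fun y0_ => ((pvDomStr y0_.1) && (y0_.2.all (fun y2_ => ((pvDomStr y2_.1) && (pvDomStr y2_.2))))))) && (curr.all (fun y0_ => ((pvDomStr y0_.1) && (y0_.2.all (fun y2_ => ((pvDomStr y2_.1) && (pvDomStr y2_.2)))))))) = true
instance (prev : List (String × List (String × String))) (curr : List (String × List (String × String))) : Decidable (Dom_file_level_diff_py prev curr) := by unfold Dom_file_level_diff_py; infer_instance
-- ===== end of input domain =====

-- B replaces A's single classify-as-you-walk pass over the sorted key union by set algebra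
-- (added/removed/modified computed as set differences/intersection first), tagging each key
-- with its line and doing one sort by key at the end; objective: alternative decomposition,
-- same asymptotic cost, return value proved identical.

-- ===== PORT A =====
-- 'prev_files[key] != curr_files[key]' is ported as inequality of 'get?' results: both
-- branches are only reached when both dicts contain the key, where get? = some value.
def file_level_diff_py (prev : List (String × List (String × String))) (curr : List (String × List (String × String))) : List String :=
  let prevFiles := PySem.Dict.getD (PySem.Dict.ofList prev) "files" []
  let currFiles := PySem.Dict.getD (PySem.Dict.ofList curr) "files" []
  let pf := PySem.Dict.ofList prevFiles
  let cf := PySem.Dict.ofList currFiles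
  let allKeys := PySem.List.sorted
    (PySem.Set.union (PySem.Set.ofList (PySem.Dict.keys pf)) (PySem.Set.ofList (PySem.Dict.keys cf)))
    (fun k => k) false
  allKeys.foldl (fun lines key =>
    if ¬ (PySem.Dict.contains pf key = true) then lines ++ ["+ Added: " ++ key]
    else if ¬ (PySem.Dict.contains cf key = true) then lines ++ ["- Removed: " ++ key]
    else if PySem.Dict.get? pf key ≠ PySem.Dict.get? cf key then lines ++ ["~ Modified: " ++ key]
    else lines) []

-- ===== PORT B =====
-- The Python comprehensions iterate over sets before sorting; since the tagged keys are
-- distinct and the final sort is by key, the result is independent of that iteration order,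
-- so iterating the Set lists here is exact.
def file_level_diff_py_alt (prev : List (String × List (String × String))) (curr : List (String × List (String × String))) : List String :=
  let prevFiles := PySem.Dict.getD (PySem.Dict.ofList prev) "files" []
  let currFiles := PySem.Dict.getD (PySem.Dict.ofList curr) "files" []
  let pf := PySem.Dict.ofList prevFiles
  let cf := PySem.Dict.ofList currFiles
  let pk := PySem.Set.ofList (PySem.Dict.keys pf)
  let ck := PySem.Set.ofList (PySem.Dict.keys cf)
  let tagged :=
    (PySem.Set.diff ck pk).map (fun k => (k, "+ Added: " ++ k))
    ++ (PySem.Set.diff pk ck).map (fun k => (k, "- Removed: " ++ k))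
    ++ ((PySem.Set.inter pk ck).filter
          (fun k => decide (PySem.Dict.get? pf k ≠ PySem.Dict.get? cf k))).map
        (fun k => (k, "~ Modified: " ++ k))
  (PySem.List.sorted tagged (fun it => it.1) false).map (fun it => it.2)

-- ===== PRECONDITION & SPEC =====
def Spec_file_level_diff_py (prev : List (String × List (String × String))) (curr : List (String × List (String × String))) (out : List String) : Prop := out = file_level_diff_py_alt prev curr
instance (prev : List (String × List (String × String))) (curr : List (String × List (String × String))) (out : List String) : Decidable (Spec_file_level_diff_py prev curr out) := by unfold Spec_file_level_diff_py; infer_instance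

-- ===== CLAIM (what is proved, stated in full; the proofs are below) =====
def Claim_equal_file_level_diff_py : Prop := ∀ (prev : List (String × List (String × String))) (curr : List (String × List (String × String))), Dom_file_level_diff_py prev curr → Spec_file_level_diff_py prev curr (file_level_diff_py prev curr)

-- ===== LEMMAS AND PROOFS =====

-- classification of one key, the Option-valued core both ports share
def pvG (pf cf : PySem.Dict String String) (k : String) : Option String :=
  if ¬ (PySem.Dict.contains pf k = true) then some ("+ Added: " ++ k)
  else if ¬ (PySem.Dict.contains cf k = true) then some ("- Removed: " ++ k)
  else if PySem.Dict.get? pf k ≠ PySem.Dict.get? cf k then some ("~ Modified: " ++ k)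
  else none

def pvH (pf cf : PySem.Dict String String) (k : String) : Option (String × String) :=
  (pvG pf cf k).map (fun s => (k, s))

theorem pv_foldl_filterMap (pf cf : PySem.Dict String String) (l : List String) (acc : List String) :
    l.foldl (fun lines key =>
      if ¬ (PySem.Dict.contains pf key = true) then lines ++ ["+ Added: " ++ key]
      else if ¬ (PySem.Dict.contains cf key = true) then lines ++ ["- Removed: " ++ key]
      else if PySem.Dict.get? pf key ≠ PySem.Dict.get? cf key then lines ++ ["~ Modified: " ++ key]
      else lines) acc = acc ++ l.filterMap (pvG pf cf) := by
  induction l generalizing acc with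
  | nil => simp
  | cons x xs ih =>
    rw [List.foldl_cons, List.filterMap_cons]
    unfold pvG
    split_ifs <;> rw [ih] <;> simp [pvG]

theorem pv_filterMap_eq_map {α β : Type} (l : List α) (h : α → Option β) (f : α → β)
    (H : ∀ x ∈ l, h x = some (f x)) : l.filterMap h = l.map f := by
  induction l with
  | nil => rfl
  | cons x xs ih =>
    simp only [List.filterMap_cons, H x (List.mem_cons_self ..), List.map_cons]
    rw [ih (fun y hy => H y (List.mem_cons_of_mem _ hy))]

theorem pv_filterMap_eq_filter_map {α β : Type} (l : List α) (h : α → Option β) (f : α → β)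
    (p : α → Bool) (H : ∀ x ∈ l, h x = if p x then some (f x) else none) :
    l.filterMap h = (l.filter p).map f := by
  induction l with
  | nil => rfl
  | cons x xs ih =>
    have hx := H x (List.mem_cons_self ..)
    have ih' := ih (fun y hy => H y (List.mem_cons_of_mem _ hy))
    by_cases hp : p x = true
    · simp [hx, hp, ih']
    · simp at hp
      simp [hx, hp, ih']

theorem pv_main (pf cf : PySem.Dict String String) :
    (PySem.List.sorted
        (PySem.Set.union (PySem.Set.ofList (PySem.Dict.keys pf)) (PySem.Set.ofList (PySem.Dict.keys cf)))
        (fun k => k) false).foldl (fun lines key =>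
      if ¬ (PySem.Dict.contains pf key = true) then lines ++ ["+ Added: " ++ key]
      else if ¬ (PySem.Dict.contains cf key = true) then lines ++ ["- Removed: " ++ key]
      else if PySem.Dict.get? pf key ≠ PySem.Dict.get? cf key then lines ++ ["~ Modified: " ++ key]
      else lines) [] =
    (PySem.List.sorted
        ((PySem.Set.diff (PySem.Set.ofList (PySem.Dict.keys cf)) (PySem.Set.ofList (PySem.Dict.keys pf))).map (fun k => (k, "+ Added: " ++ k))
          ++ (PySem.Set.diff (PySem.Set.ofList (PySem.Dict.keys pf)) (PySem.Set.ofList (PySem.Dict.keys cf))).map (fun k => (k, "- Removed: " ++ k))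
          ++ ((PySem.Set.inter (PySem.Set.ofList (PySem.Dict.keys pf)) (PySem.Set.ofList (PySem.Dict.keys cf))).filter
                (fun k => decide (PySem.Dict.get? pf k ≠ PySem.Dict.get? cf k))).map
              (fun k => (k, "~ Modified: " ++ k)))
        (fun it => it.1) false).map (fun it => it.2) := by
  have hpk : ∀ k, k ∈ PySem.Set.ofList (PySem.Dict.keys pf) ↔ PySem.Dict.contains pf k = true := by
    intro k
    rw [PySem.Set.mem_ofList, PySem.Dict.contains_iff_mem_keys]
  have hck : ∀ k, k ∈ PySem.Set.ofList (PySem.Dict.keys cf) ↔ PySem.Dict.contains cf k = true := by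
    intro k
    rw [PySem.Set.mem_ofList, PySem.Dict.contains_iff_mem_keys]
  set pk := PySem.Set.ofList (PySem.Dict.keys pf) with hpkdef
  set ck := PySem.Set.ofList (PySem.Dict.keys cf) with hckdef
  have npk : pk.Nodup := PySem.Set.nodup_ofList _
  have nck : ck.Nodup := PySem.Set.nodup_ofList _
  set U := PySem.Set.union pk ck with hUdef
  have nU : U.Nodup := PySem.Set.nodup_union pk ck npk
  set S := PySem.List.sorted U (fun k => k) false with hSdef
  -- step 1: A's loop is a filterMap over S
  rw [pv_foldl_filterMap pf cf S [], List.nil_append]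
  -- step 3: the tagged list is a filterMap over the three key groups
  have hA1 : (PySem.Set.diff ck pk).map (fun k => (k, "+ Added: " ++ k))
      = (PySem.Set.diff ck pk).filterMap (pvH pf cf) := by
    refine (pv_filterMap_eq_map _ _ _ ?_).symm
    intro k hk
    rcases (PySem.Set.mem_diff _ _ _).1 hk with ⟨_, hnp⟩
    have hcp : ¬ PySem.Dict.contains pf k = true := fun h => hnp ((hpk k).2 h)
    simp [pvH, pvG, hcp]
  have hA2 : (PySem.Set.diff pk ck).map (fun k => (k, "- Removed: " ++ k))
      = (PySem.Set.diff pk ck).filterMap (pvH pf cf) := by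
    refine (pv_filterMap_eq_map _ _ _ ?_).symm
    intro k hk
    rcases (PySem.Set.mem_diff _ _ _).1 hk with ⟨hp, hnc⟩
    have hcc : ¬ PySem.Dict.contains cf k = true := fun h => hnc ((hck k).2 h)
    simp [pvH, pvG, (hpk k).1 hp, hcc]
  have hA3 : ((PySem.Set.inter pk ck).filter
        (fun k => decide (PySem.Dict.get? pf k ≠ PySem.Dict.get? cf k))).map
        (fun k => (k, "~ Modified: " ++ k))
      = (PySem.Set.inter pk ck).filterMap (pvH pf cf) := by
    refine (pv_filterMap_eq_filter_map _ _ _ _ ?_).symm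
    intro k hk
    rcases (PySem.Set.mem_inter _ _ _).1 hk with ⟨hp, hc⟩
    by_cases hne : PySem.Dict.get? pf k = PySem.Dict.get? cf k
    · simp [pvH, pvG, (hpk k).1 hp, (hck k).1 hc, hne]
    · simp [pvH, pvG, (hpk k).1 hp, (hck k).1 hc, hne]
  rw [hA1, hA2, hA3, ← List.filterMap_append, ← List.filterMap_append]
  set L3 := PySem.Set.diff ck pk ++ PySem.Set.diff pk ck ++ PySem.Set.inter pk ck with hL3
  -- step 4: L3 is a permutation of the key union U
  have hL3U : L3.Perm U := by
    rw [List.perm_ext_iff_of_nodup ?nd1 nU]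
    case nd1 =>
      refine (((PySem.Set.nodup_diff _ _ nck).append (PySem.Set.nodup_diff _ _ npk) ?_).append
        (PySem.Set.nodup_inter _ _ npk)) ?_
      · intro a ha hb
        rcases (PySem.Set.mem_diff _ _ _).1 ha with ⟨h1, _⟩
        exact ((PySem.Set.mem_diff _ _ _).1 hb).2 h1
      · intro a ha hb
        rcases (List.mem_append).1 ha with ha | ha
        · exact ((PySem.Set.mem_diff _ _ _).1 ha).2 ((PySem.Set.mem_inter _ _ _).1 hb).1
        · exact ((PySem.Set.mem_diff _ _ _).1 ha).2 ((PySem.Set.mem_inter _ _ _).1 hb).2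
    intro a
    simp only [hL3, List.mem_append, PySem.Set.mem_diff, PySem.Set.mem_inter,
      hUdef, PySem.Set.mem_union]
    tauto
  -- step 5/6: the filterMap over S is a permutation of the tagged list
  have hperm : (S.filterMap (pvH pf cf)).Perm (L3.filterMap (pvH pf cf)) :=
    ((PySem.List.sorted_perm (xs := U) (key := fun k => k) (rev := false)).filterMap _).trans
      (hL3U.filterMap _).symm
  -- step 7: the filterMap over S is strictly increasing on keys
  have hSlt : S.Pairwise (fun a b => a < b) := by
    rw [hSdef, ← PySem.Set.ofList_eq_self_of_nodup U nU]
    exact PySem.List.sorted_ofList_pairwise_lt U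
  have hpair : (S.filterMap (pvH pf cf)).Pairwise (fun a b => a.1 < b.1) := by
    rw [List.pairwise_filterMap]
    refine hSlt.imp_of_mem ?_
    intro a b ha hb hab x hx y hy
    have hxa : x.1 = a := by
      cases hg : pvG pf cf a with
      | none => simp [pvH, hg] at hx
      | some s => simp only [pvH, hg, Option.map_some, Option.some.injEq] at hx; rw [← hx]
    have hyb : y.1 = b := by
      cases hg : pvG pf cf b with
      | none => simp [pvH, hg] at hy
      | some s => simp only [pvH, hg, Option.map_some, Option.some.injEq] at hy; rw [← hy]
    rw [hxa, hyb]; exact hab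
  -- step 8: therefore sorting the tagged list by key yields exactly that filterMap
  rw [PySem.List.sorted_eq_of_perm_of_pairwise_lt _ _ _ hperm hpair]
  -- step 9: dropping the keys recovers A's lines
  rw [List.map_filterMap]
  refine (List.filterMap_congr ?_).symm
  intro k _
  simp [pvH, Option.map_map]

-- ===== VERDICT (by name: the statement is the Claim_ definition above) =====
theorem file_level_diff_py_spec : Claim_equal_file_level_diff_py := by
  intro prev curr _
  show file_level_diff_py prev curr = file_level_diff_py_alt prev curr
  exact pv_main _ _
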